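-- pv_equiv track=rewrite | github.com/EsraaSoliman2003/Compiler | parser.py | is_simple_grammar
-- ===== SOURCE A (Python) =====
-- def is_simple_grammar(grammar):
--     # Check for epsilon productions
--     for productions in grammar.values():
--         if '' in productions:
--             return False
--
--     # Check for disjointness and correct form
--     for productions in grammar.values():
--         first_terminals = set()
--         for production in productions:
--             if not production or production[0].isupper():
--                 return False
--             if production[0] in first_terminals:
--                 return False
--             first_terminals.add(production[0])
--     return True
-- ===== SOURCE B (Python) =====
-- def is_simple_grammar(grammar):
--     def simple(productions):
--         if any(p == '' or p[0].isupper() for p in productions):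
--             return False
--         firsts = sorted(p[0] for p in productions)
--         return all(a != b for a, b in zip(firsts, firsts[1:]))
--     return all(simple(ps) for ps in grammar.values())
-- ===== Notes on version B (the rewrite author's own statement) =====
-- stated objective: alternative
-- what changed: Duplicate first-terminal detection is done by sorting the list of first characters and scanning adjacent pairs for equality, instead of A's incremental membership set with early returns; the epsilon check is folded into the well-formedness test and the whole function is one all() over the production lists.
import Mathlib
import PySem

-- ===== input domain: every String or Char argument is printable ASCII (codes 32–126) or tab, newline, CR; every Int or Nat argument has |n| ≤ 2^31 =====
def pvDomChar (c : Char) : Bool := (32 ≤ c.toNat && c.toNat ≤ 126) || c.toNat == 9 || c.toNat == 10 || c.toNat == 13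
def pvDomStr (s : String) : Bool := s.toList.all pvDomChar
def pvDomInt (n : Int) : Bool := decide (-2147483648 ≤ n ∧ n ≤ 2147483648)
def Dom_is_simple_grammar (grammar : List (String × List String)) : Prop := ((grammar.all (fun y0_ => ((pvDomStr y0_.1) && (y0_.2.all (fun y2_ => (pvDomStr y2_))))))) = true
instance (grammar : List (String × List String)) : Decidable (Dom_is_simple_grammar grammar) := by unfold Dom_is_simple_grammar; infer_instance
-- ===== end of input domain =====

-- B detects duplicate first terminals by sorting the first characters and scanning adjacent
-- pairs, instead of A's incremental membership set with early returns (objective: alternative).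

-- ===== PORT A =====
-- inner 'for production in productions' loop with its running set of first terminals
def pvAInner (productions : List String) (first_terminals : PySem.Set Char) : Bool :=
  match productions with
  | [] => true
  | p :: rest =>
    match p.toList with
    | [] => false                                   -- 'not production'
    | c :: _ =>
      if PySem.Chars.isupper c then false           -- 'production[0].isupper()'
      else if PySem.Set.contains first_terminals c then false
      else pvAInner rest (PySem.Set.add first_terminals c)

-- first pass: epsilon productions
def pvALoop1 : List (String × List String) → Bool
  | [] => true
  | (_, ps) :: rest => if ps.contains "" then false else pvALoop1 rest

-- second pass: disjointness and correct form
def pvALoop2 : List (String × List String) → Bool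
  | [] => true
  | (_, ps) :: rest => if pvAInner ps PySem.Set.empty = false then false else pvALoop2 rest

def is_simple_grammar (grammar : List (String × List String)) : Bool :=
  if pvALoop1 grammar = false then false else pvALoop2 grammar

-- ===== PORT B =====
-- helper 'simple(productions)': reject empty/uppercase-first productions, then sort the
-- first characters and require all adjacent pairs distinct
def pvBCheck (productions : List String) : Bool :=
  if productions.any (fun p => p == "" || PySem.Chars.isupper (p.toList.headD ' ')) then false
  else
    let firsts := PySem.List.sorted (productions.map (fun p => p.toList.headD ' ')) (fun c => c) false
    (firsts.zip firsts.tail).all (fun ab => ab.1 != ab.2)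

def is_simple_grammar_alt (grammar : List (String × List String)) : Bool :=
  grammar.all (fun kv => pvBCheck kv.2)

-- ===== PRECONDITION & SPEC =====
def Spec_is_simple_grammar (grammar : List (String × List String)) (out : Bool) : Prop := out = is_simple_grammar_alt grammar
instance (grammar : List (String × List String)) (out : Bool) : Decidable (Spec_is_simple_grammar grammar out) := by unfold Spec_is_simple_grammar; infer_instance

-- ===== CLAIM (what is proved, stated in full; the proofs are below) =====
def Claim_equal_is_simple_grammar : Prop := ∀ (grammar : List (String × List String)), Dom_is_simple_grammar grammar → Spec_is_simple_grammar grammar (is_simple_grammar grammar)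

-- ===== LEMMAS AND PROOFS =====

-- the first character of a production, as both ports read it
def pvFirst (p : String) : Char := p.toList.headD ' '

lemma pv_str_empty_iff (p : String) : p = "" ↔ p.toList = [] := by
  simp

-- the zip-with-tail adjacency scan is IsChain (· ≠ ·)
lemma pv_zip_tail_all_ne (l : List Char) :
    ((l.zip l.tail).all (fun ab => ab.1 != ab.2) = true) ↔ l.IsChain (· ≠ ·) := by
  induction l with
  | nil => simp
  | cons a l ih =>
    cases l with
    | nil =>
      simp only [List.tail_cons, List.zip_nil_right, List.all_nil]
      exact ⟨fun _ => .singleton _, fun _ => trivial⟩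
    | cons b t =>
      simp only [List.tail_cons] at ih ⊢
      rw [List.zip_cons_cons, List.all_cons, Bool.and_eq_true, bne_iff_ne,
        List.isChain_cons_cons, ih]

-- adjacent-distinct and adjacent-≤ give adjacent-<
lemma pv_lt_of_chains : ∀ l : List Char, l.IsChain (· ≠ ·) → l.IsChain (· ≤ ·) → l.IsChain (· < ·)
  | [], _, _ => .nil
  | [_], _, _ => .singleton _
  | _ :: b :: t, hc, hle => by
    rw [List.isChain_cons_cons] at hc hle ⊢
    exact ⟨lt_of_le_of_ne hle.1 hc.1, pv_lt_of_chains (b :: t) hc.2 hle.2⟩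

-- on a ≤-sorted list, no adjacent duplicates ↔ no duplicates at all
lemma pv_chain_ne_iff_nodup (l : List Char) (hs : l.Pairwise (· ≤ ·)) :
    (l.IsChain (· ≠ ·) ↔ l.Nodup) := by
  constructor
  · intro hc
    have hlt := pv_lt_of_chains l hc (List.isChain_iff_pairwise.2 hs)
    exact (List.isChain_iff_pairwise.1 hlt).imp ne_of_lt
  · intro hnd
    have hlt : l.Pairwise (· < ·) := (hs.and hnd).imp (fun h => lt_of_le_of_ne h.1 h.2)
    exact (List.isChain_iff_pairwise.2 hlt).imp (fun _ _ h => ne_of_lt h)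

lemma pvAInner_iff (ps : List String) : ∀ s : PySem.Set Char,
    (pvAInner ps s = true ↔
      ((∀ p ∈ ps, p.toList ≠ [] ∧ PySem.Chars.isupper (pvFirst p) = false) ∧
       (∀ c ∈ ps.map pvFirst, c ∉ s) ∧ (ps.map pvFirst).Nodup)) := by
  induction ps with
  | nil => intro s; simp [pvAInner]
  | cons p ps ih =>
    intro s
    rcases hp : p.toList with _ | ⟨c, cs⟩
    · simp only [pvAInner, hp, Bool.false_eq_true, false_iff]
      rintro ⟨hform, -⟩
      exact (hform p (by simp)).1 hp
    · have hfirst : pvFirst p = c := by simp [pvFirst, hp]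
      simp only [pvAInner, hp]
      by_cases hu : PySem.Chars.isupper c = true
      · simp only [hu, if_true, Bool.false_eq_true, false_iff]
        rintro ⟨hform, -⟩
        have hfu := (hform p (by simp)).2
        rw [hfirst] at hfu
        rw [hfu] at hu
        cases hu
      · rw [if_neg hu]
        by_cases hc : c ∈ s
        · rw [if_pos ((PySem.Set.contains_iff s c).2 hc)]
          simp only [Bool.false_eq_true, false_iff]
          rintro ⟨-, hdisj, -⟩
          exact hdisj c (by simp [hfirst]) hc
        · rw [if_neg (fun hcc => hc ((PySem.Set.contains_iff s c).1 hcc))]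
          have hadd : s.add c = s ++ [c] := by
            simp only [PySem.Set.add]
            rw [if_neg (fun hcc => hc ((PySem.Set.contains_iff s c).1 hcc))]
          rw [hadd, ih (s ++ [c])]
          have hformp1 : p.toList ≠ [] := by simp [hp]
          have hformp2 : PySem.Chars.isupper (pvFirst p) = false := by
            rw [hfirst]; exact Bool.eq_false_iff.mpr hu
          constructor
          · rintro ⟨hform, hdisj, hnd⟩
            refine ⟨?_, ?_, ?_⟩
            · intro q hq
              rcases List.mem_cons.1 hq with rfl | hq
              · exact ⟨hformp1, hformp2⟩
              · exact hform q hq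
            · intro d hd
              rw [List.map_cons, hfirst] at hd
              rcases List.mem_cons.1 hd with rfl | hd
              · exact hc
              · exact fun hds => (hdisj d hd) (List.mem_append.2 (Or.inl hds))
            · rw [List.map_cons, hfirst]
              refine List.nodup_cons.2 ⟨fun hcm => ?_, hnd⟩
              exact (hdisj c hcm) (List.mem_append.2 (Or.inr (List.mem_singleton.2 rfl)))
          · rintro ⟨hform, hdisj, hnd⟩
            rw [List.map_cons, hfirst] at hnd
            have hnd' := List.nodup_cons.1 hnd
            refine ⟨fun q hq => hform q (List.mem_cons.2 (Or.inr hq)), ?_, hnd'.2⟩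
            intro d hd hds
            rcases List.mem_append.1 hds with hds' | hds'
            · exact hdisj d (by rw [List.map_cons, hfirst]; exact List.mem_cons.2 (Or.inr hd)) hds'
            · have hdc : d = c := List.mem_singleton.1 hds'
              subst hdc
              exact hnd'.1 hd

lemma pvBCheck_iff (ps : List String) :
    (pvBCheck ps = true ↔
      ((∀ p ∈ ps, p.toList ≠ [] ∧ PySem.Chars.isupper (pvFirst p) = false) ∧
       (ps.map pvFirst).Nodup)) := by
  simp only [pvBCheck]
  by_cases hbad : ps.any (fun p => p == "" || PySem.Chars.isupper (p.toList.headD ' ')) = true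
  · rw [if_pos hbad]
    simp only [Bool.false_eq_true, false_iff]
    rcases List.any_eq_true.1 hbad with ⟨p, hp, hb⟩
    simp only [Bool.or_eq_true, beq_iff_eq] at hb
    rintro ⟨hform, -⟩
    rcases hform p hp with ⟨hne, hnu⟩
    rcases hb with rfl | hu
    · exact hne ((pv_str_empty_iff "").1 rfl)
    · rw [show (p.toList.headD ' ') = pvFirst p from rfl, hnu] at hu
      cases hu
  · rw [if_neg hbad]
    have hnot : ∀ p ∈ ps, ¬(p = "" ∨ PySem.Chars.isupper (p.toList.headD ' ') = true) := by
      intro p hp h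
      exact hbad (List.any_eq_true.2 ⟨p, hp, by
        simp only [Bool.or_eq_true, beq_iff_eq]; exact h⟩)
    have hform : ∀ p ∈ ps, p.toList ≠ [] ∧ PySem.Chars.isupper (pvFirst p) = false := by
      intro p hp
      have h := hnot p hp
      push Not at h
      exact ⟨fun hl => h.1 ((pv_str_empty_iff p).2 hl), Bool.eq_false_iff.mpr h.2⟩
    have hmapfirst : (fun p : String => p.toList.headD ' ') = pvFirst := rfl
    rw [hmapfirst]
    set srt := PySem.List.sorted (ps.map pvFirst) (fun c => c) false with hsrt
    have hpw : srt.Pairwise (· ≤ ·) := by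
      have := PySem.List.sorted_pairwise (ps.map pvFirst) (fun c => c)
      simpa [hsrt] using this
    have hperm : srt.Perm (ps.map pvFirst) := PySem.List.sorted_perm _ _ _
    rw [pv_zip_tail_all_ne, pv_chain_ne_iff_nodup srt hpw, hperm.nodup_iff]
    exact ⟨fun h => ⟨hform, h⟩, fun h => h.2⟩

lemma pvALoop1_iff (g : List (String × List String)) :
    (pvALoop1 g = true ↔ ∀ kv ∈ g, ("" : String) ∉ kv.2) := by
  induction g with
  | nil => simp [pvALoop1]
  | cons kv g ih =>
    obtain ⟨k, ps⟩ := kv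
    simp only [pvALoop1]
    by_cases h : ("" : String) ∈ ps
    · rw [if_pos (by simpa using h)]
      simp only [Bool.false_eq_true, false_iff]
      intro hall
      exact hall (k, ps) (by simp) h
    · rw [if_neg (by simpa using h)]
      rw [ih]
      simp only [List.mem_cons, forall_eq_or_imp]
      exact ⟨fun hall => ⟨h, hall⟩, fun hall => hall.2⟩

lemma pvALoop2_iff (g : List (String × List String)) :
    (pvALoop2 g = true ↔ ∀ kv ∈ g, pvAInner kv.2 PySem.Set.empty = true) := by
  induction g with
  | nil => simp [pvALoop2]
  | cons kv g ih =>
    obtain ⟨k, ps⟩ := kv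
    simp only [pvALoop2]
    by_cases h : pvAInner ps PySem.Set.empty = true
    · rw [if_neg (by simp only [h]; decide)]
      rw [ih]
      simp only [List.mem_cons, forall_eq_or_imp]
      exact ⟨fun hall => ⟨h, hall⟩, fun hall => hall.2⟩
    · rw [if_pos (Bool.eq_false_iff.mpr h)]
      simp only [Bool.false_eq_true, false_iff]
      intro hall
      exact h (hall (k, ps) (by simp))

lemma pv_perlist (ps : List String) :
    ((("" : String) ∉ ps ∧ pvAInner ps PySem.Set.empty = true) ↔ pvBCheck ps = true) := by
  rw [pvBCheck_iff, pvAInner_iff ps PySem.Set.empty]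
  constructor
  · rintro ⟨-, hform, -, hnd⟩
    exact ⟨hform, hnd⟩
  · rintro ⟨hform, hnd⟩
    refine ⟨fun hmem => (hform _ hmem).1 ((pv_str_empty_iff "").1 rfl), hform, ?_, hnd⟩
    intro c _ hcs
    simp [PySem.Set.empty] at hcs

-- ===== VERDICT (by name: the statement is the Claim_ definition above) =====
theorem is_simple_grammar_spec : Claim_equal_is_simple_grammar := by
  intro g _
  show is_simple_grammar g = is_simple_grammar_alt g
  rw [Bool.eq_iff_iff]
  simp only [is_simple_grammar, is_simple_grammar_alt]
  constructor
  · intro h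
    by_cases h1 : pvALoop1 g = false
    · rw [if_pos h1] at h; cases h
    · rw [if_neg h1] at h
      have hl1 := (pvALoop1_iff g).1 (by revert h1; cases pvALoop1 g <;> simp)
      have hl2 := (pvALoop2_iff g).1 h
      rw [List.all_eq_true]
      intro kv hkv
      exact (pv_perlist kv.2).1 ⟨hl1 kv hkv, hl2 kv hkv⟩
  · intro h
    rw [List.all_eq_true] at h
    have hall : ∀ kv ∈ g, ("" : String) ∉ kv.2 ∧ pvAInner kv.2 PySem.Set.empty = true :=
      fun kv hkv => (pv_perlist kv.2).2 (h kv hkv)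
    have h1 : pvALoop1 g = true := (pvALoop1_iff g).2 (fun kv hkv => (hall kv hkv).1)
    rw [if_neg (by simp only [h1]; decide)]
    exact (pvALoop2_iff g).2 (fun kv hkv => (hall kv hkv).2)
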